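-- pv_equiv track=rewrite | github.com/VikasKumarSrivastava/Career-Camp-CN | Milestone1/Recursion_assignment/check_AB.py | check_AB
-- ===== SOURCE A (Python) =====
-- def check_AB(str):
--     if len(str)==0:
--         return True
--     if (str[0] == 'a'):
--         if (len(str[1:])>1 and str[1:3] == 'bb'):
--             return check_AB(str[3:])
--         else:
--             return check_AB(str[1:])
--     else:
--         return False
-- ===== SOURCE B (Python) =====
-- def check_AB(str):
--     s = str
--     n = len(s)
--     i = 0
--     while i < n:
--         if s[i] != 'a':
--             return False
--         if i + 3 <= n and s[i + 1] == 'b' and s[i + 2] == 'b':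
--             i += 3
--         else:
--             i += 1
--     return True
-- ===== Notes on version B (the rewrite author's own statement) =====
-- stated objective: faster
-- what changed: Replaced the recursion that copies string slices at every step with a single iterative scan over an index pointer, so no substrings are ever built.
import Mathlib
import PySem

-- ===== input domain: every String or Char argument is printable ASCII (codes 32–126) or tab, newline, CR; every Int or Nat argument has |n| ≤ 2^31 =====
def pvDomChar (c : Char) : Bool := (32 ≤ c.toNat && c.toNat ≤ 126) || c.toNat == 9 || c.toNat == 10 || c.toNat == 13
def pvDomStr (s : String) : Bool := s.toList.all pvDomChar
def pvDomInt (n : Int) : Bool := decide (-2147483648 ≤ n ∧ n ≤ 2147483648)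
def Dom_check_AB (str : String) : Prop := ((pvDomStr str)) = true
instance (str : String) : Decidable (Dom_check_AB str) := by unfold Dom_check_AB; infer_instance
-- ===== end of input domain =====

-- B replaces A's recursion over fresh string slices by one linear scan with an index pointer (objective: faster, no slice copies).

-- ===== PORT A =====
-- recursion over the list of characters, one step per Python call; slices via PySem.List.slice
def pvCheckA (s : List Char) : Bool :=
  if s.length = 0 then true
  else if PySem.List.pyGet? s 0 == some 'a' then
    if decide ((PySem.List.slice s (some 1) none).length > 1) &&
       (PySem.List.slice s (some 1) (some 3) == ['b', 'b']) then
      pvCheckA (PySem.List.slice s (some 3) none)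
    else
      pvCheckA (PySem.List.slice s (some 1) none)
  else false
termination_by s.length
decreasing_by
  all_goals simp [pysem]; omega

def check_AB (str : String) : Bool := pvCheckA str.toList

-- ===== PORT B =====
-- the while loop: index i walks forward, no substrings built
def pvCheckBGo (s : List Char) (n i : Nat) : Bool :=
  if i < n then
    if PySem.List.pyGet? s (i : Int) != some 'a' then false
    else if decide (i + 3 ≤ n) && (PySem.List.pyGet? s ((i : Int) + 1) == some 'b') &&
            (PySem.List.pyGet? s ((i : Int) + 2) == some 'b') then
      pvCheckBGo s n (i + 3)
    else
      pvCheckBGo s n (i + 1)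
  else true
termination_by n - i

def check_AB_alt (str : String) : Bool :=
  let s := str.toList
  pvCheckBGo s s.length 0

-- ===== PRECONDITION & SPEC =====
def Spec_check_AB (str : String) (out : Bool) : Prop := out = check_AB_alt str
instance (str : String) (out : Bool) : Decidable (Spec_check_AB str out) := by unfold Spec_check_AB; infer_instance

-- ===== CLAIM (what is proved, stated in full; the proofs are below) =====
def Claim_equal_check_AB : Prop := ∀ (str : String), Dom_check_AB str → Spec_check_AB str (check_AB str)

-- ===== LEMMAS AND PROOFS =====

theorem pvCheckA_cons (c : Char) (t : List Char) :
    pvCheckA (c :: t) =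
      if c == 'a' then
        (if decide (t.length > 1) && (t.take 2 == ['b','b']) then pvCheckA (t.drop 2)
         else pvCheckA t)
      else false := by
  rw [pvCheckA]
  by_cases hc : c = 'a'
  · subst hc
    simp only [List.length_cons, Nat.succ_ne_zero, if_false]
    rw [if_pos (by simp)]
    have h1 : PySem.List.slice ('a' :: t) (some 1) none = t := by simp [pysem]
    have h2 : PySem.List.slice ('a' :: t) (some 1) (some 3) = t.take 2 := by simp [pysem]
    have h3 : PySem.List.slice ('a' :: t) (some 3) none = t.drop 2 := by simp [pysem]
    rw [h1, h2, h3]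
    simp
  · have : ¬ (PySem.List.pyGet? (c :: t) 0 == some 'a') = true := by
      simp [pysem, hc]
    simp [hc]

theorem castn (a k : Nat) : ((a : Int) + (k : Int)) = ((a + k : Nat) : Int) := by push_cast; ring

theorem cond_eq (s : List Char) (a : Nat) :
    (decide ((s.drop (a+1)).length > 1) && ((s.drop (a+1)).take 2 == ['b','b']))
    = (decide (a + 3 ≤ s.length) && (PySem.List.pyGet? s ((a : Int) + 1) == some 'b') &&
       (PySem.List.pyGet? s ((a : Int) + 2) == some 'b')) := by
  rw [show ((a : Int) + 1) = ((a + 1 : Nat) : Int) from castn a 1,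
      show ((a : Int) + 2) = ((a + 2 : Nat) : Int) from castn a 2,
      PySem.List.pyGet?_natCast, PySem.List.pyGet?_natCast]
  by_cases h3 : a + 3 ≤ s.length
  · have h1 : a + 1 < s.length := by omega
    have h2 : a + 1 + 1 < s.length := by omega
    have ht : (s.drop (a+1)).take 2 = [s[a+1], s[a+1+1]] := by
      rw [List.drop_eq_getElem_cons h1, List.drop_eq_getElem_cons h2]
      simp only [List.take_succ_cons, List.take_zero]
    rw [ht]
    simp only [List.length_drop, List.cons_beq_cons, show a+1+1 = a+2 from rfl,
      List.getElem?_eq_getElem h1, List.getElem?_eq_getElem (show a+2 < s.length by omega)]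
    simp [show (s.length - (a+1) > 1) ↔ (a + 3 ≤ s.length) from by omega, Bool.and_assoc]
  · simp only [List.length_drop]
    simp [h3]
    intro h
    exact absurd h (by omega)

theorem pvCheckBGo_eq_pvCheckA (s : List Char) (i : Nat) :
    pvCheckBGo s s.length i = pvCheckA (s.drop i) := by
  fun_induction pvCheckBGo s s.length i with
  | case1 a b c =>
    rw [List.drop_eq_getElem_cons b, pvCheckA_cons]
    have : ¬ s[a] = 'a' := by
      simp only [bne_iff_ne, ne_eq, PySem.List.pyGet?_natCast,
        List.getElem?_eq_getElem b] at c
      exact fun h => c (by rw [h])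
    simp [this]
  | case2 a b c d e =>
    rw [List.drop_eq_getElem_cons b, pvCheckA_cons]
    have hca : s[a] = 'a' := by
      simp only [bne_iff_ne, ne_eq, not_not, PySem.List.pyGet?_natCast,
        List.getElem?_eq_getElem b, Option.some_inj] at c
      exact c
    rw [if_pos (by simp [hca]), cond_eq, if_pos d, List.drop_drop,
      show a + 1 + 2 = a + 3 from rfl]
    exact e
  | case3 a b c d e =>
    rw [List.drop_eq_getElem_cons b, pvCheckA_cons]
    have hca : s[a] = 'a' := by
      simp only [bne_iff_ne, ne_eq, not_not, PySem.List.pyGet?_natCast,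
        List.getElem?_eq_getElem b, Option.some_inj] at c
      exact c
    rw [if_pos (by simp [hca]), cond_eq, if_neg (by simpa using d)]
    exact e
  | case4 a b =>
    rw [List.drop_eq_nil_of_le (by omega), pvCheckA]
    simp

-- ===== VERDICT (by name: the statement is the Claim_ definition above) =====
theorem check_AB_spec : Claim_equal_check_AB := by
  intro str _
  unfold Spec_check_AB check_AB check_AB_alt
  simpa using (pvCheckBGo_eq_pvCheckA str.toList 0).symm
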